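-- pv_equiv track=rewrite | github.com/SeongcheolJeong/Radar-Simulation | scripts/run_po_sbr_avx_developer_gate.py | _parse_profiles
-- ===== SOURCE A (Python) =====
-- from typing import Any, Dict, List, Mapping, Sequence
--
-- def _parse_profiles(items: Sequence[str]) -> List[str]:
--     out: List[str] = []
--     for raw in items:
--         for token in str(raw).split(","):
--             text = str(token).strip()
--             if text == "":
--                 continue
--             if text not in out:
--                 out.append(text)
--     return out
-- ===== SOURCE B (Python) =====
-- def _parse_profiles(items):
--     tokens = [t for raw in items for t in map(str.strip, str(raw).split(",")) if t]
--     out = []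
--     while tokens:
--         head = tokens[0]
--         out.append(head)
--         tokens = [t for t in tokens[1:] if t != head]
--     return out
-- ===== Notes on version B (the rewrite author's own statement) =====
-- stated objective: alternative
-- what changed: B first flattens all cleaned tokens in one pass, then deduplicates by selection: repeatedly take the head and purge every later copy of it from the remaining list, so A's per-token 'text not in out' membership branch against the growing output disappears entirely.
import Mathlib
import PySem

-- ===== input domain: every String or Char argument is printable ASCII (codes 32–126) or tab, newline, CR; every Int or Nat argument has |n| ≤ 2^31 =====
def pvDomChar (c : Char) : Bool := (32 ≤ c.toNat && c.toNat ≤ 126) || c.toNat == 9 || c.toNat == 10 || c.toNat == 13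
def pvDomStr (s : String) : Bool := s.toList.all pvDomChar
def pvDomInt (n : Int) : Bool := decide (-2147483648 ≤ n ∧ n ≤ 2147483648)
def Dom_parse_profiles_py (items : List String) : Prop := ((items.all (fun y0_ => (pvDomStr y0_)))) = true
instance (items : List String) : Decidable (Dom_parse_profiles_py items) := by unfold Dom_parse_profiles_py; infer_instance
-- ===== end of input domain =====

-- B flattens all cleaned tokens first, then deduplicates by selection (take the head, purge its
-- later copies from the remainder) — no membership test against the output; same return value.


-- ===== PORT A =====
def parse_profiles_py (items : List String) : List String :=
  items.foldl (fun out raw =>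
    ((PySem.Str.split? raw ",").getD []).foldl (fun out token =>
      let text := PySem.Str.strip token
      if text = "" then out
      else if text ∈ out then out else out ++ [text]) out) []

-- ===== PORT B =====
-- B's while loop: append the head to out, purge its later copies from the rest, repeat.
def pvDedupLoop (ts out : List String) : List String :=
  match ts with
  | [] => out
  | head :: rest => pvDedupLoop (rest.filter (fun t => t ≠ head)) (out ++ [head])
termination_by ts.length
decreasing_by
  simp only [List.length_unattach]
  exact Nat.lt_succ_of_le (le_trans (List.length_filter_le _ _) (by simp))

def parse_profiles_py_alt (items : List String) : List String :=
  let tokens := items.flatMap (fun raw =>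
    ((((PySem.Str.split? raw ",").getD []).map PySem.Str.strip).filter (fun t => t ≠ "")))
  pvDedupLoop tokens []

-- ===== PRECONDITION & SPEC =====
def Spec_parse_profiles_py (items : List String) (out : List String) : Prop := out = parse_profiles_py_alt items
instance (items : List String) (out : List String) : Decidable (Spec_parse_profiles_py items out) := by unfold Spec_parse_profiles_py; infer_instance

-- ===== CLAIM =====
def Claim_equal_parse_profiles_py : Prop := ∀ (items : List String), Dom_parse_profiles_py items → Spec_parse_profiles_py items (parse_profiles_py items)

-- ===== LEMMAS AND PROOFS =====

-- Selection dedup without the accumulator, for reasoning.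
def pvDedup (ts : List String) : List String :=
  match ts with
  | [] => []
  | head :: rest => head :: pvDedup (rest.filter (fun t => t ≠ head))
termination_by ts.length
decreasing_by
  simp only [List.length_unattach]
  exact Nat.lt_succ_of_le (le_trans (List.length_filter_le _ _) (by simp))

theorem pvDedupLoop_eq : ∀ (ts out : List String), pvDedupLoop ts out = out ++ pvDedup ts
  | [], out => by simp [pvDedupLoop, pvDedup]
  | head :: rest, out => by
      rw [pvDedupLoop, pvDedup, pvDedupLoop_eq]
      simp
termination_by ts => ts.length
decreasing_by
  exact Nat.lt_succ_of_le (List.length_filter_le _ _)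

-- A's inner token loop over one item equals updating the accumulator-as-set with that
-- item's cleaned nonempty tokens.
theorem pv_inner_eq_update (l : List String) (acc : List String) :
    l.foldl (fun out token =>
      let text := PySem.Str.strip token
      if text = "" then out
      else if text ∈ out then out else out ++ [text]) acc
      = PySem.Set.update acc ((l.map PySem.Str.strip).filter (fun text => text ≠ "")) := by
  induction l generalizing acc with
  | nil => rfl
  | cons h t ih =>
      simp only [List.foldl_cons, List.map_cons, List.filter_cons]
      by_cases he : PySem.Str.strip h = ""
      · simp [he, ih]
      · have hd : (decide ¬PySem.Str.strip h = "") = true := by simp [he]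
        have hadd : (if PySem.Str.strip h ∈ acc then acc else acc ++ [PySem.Str.strip h])
            = PySem.Set.add acc (PySem.Str.strip h) := by
          simp [PySem.Set.add, List.contains_eq_mem]
        simp only [if_neg he, hd, if_true, ih, hadd]
        simp [PySem.Set.update]

-- A's outer loop folds Set.update over the items; updates compose by list append.
theorem pv_outer_eq_update (items : List String) (acc : List String) :
    items.foldl (fun out raw =>
      PySem.Set.update out ((((PySem.Str.split? raw ",").getD []).map PySem.Str.strip).filter
        (fun text => text ≠ ""))) acc
      = PySem.Set.update acc (items.flatMap (fun raw =>
          (((PySem.Str.split? raw ",").getD []).map PySem.Str.strip).filter (fun text => text ≠ ""))) := by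
  induction items generalizing acc with
  | nil => rfl
  | cons h t ih =>
      simp only [List.foldl_cons, List.flatMap_cons, ih]
      simp [PySem.Set.update, List.foldl_append]

-- The set-update of an accumulator equals the accumulator followed by the selection dedup
-- of the elements not already present.
theorem pv_update_eq_dedup : ∀ (ts acc : List String),
    PySem.Set.update acc ts = acc ++ pvDedup (ts.filter (fun x => decide (x ∉ acc)))
  | [], acc => by simp [PySem.Set.update, pvDedup]
  | h :: t, acc => by
      by_cases hm : h ∈ acc
      · have hadd : PySem.Set.add acc h = acc := by
          simp [PySem.Set.add, List.contains_eq_mem, hm]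
        have : PySem.Set.update acc (h :: t) = PySem.Set.update acc t := by
          simp [PySem.Set.update, hadd]
        rw [this, pv_update_eq_dedup t acc, List.filter_cons]
        simp [hm]
      · have hadd : PySem.Set.add acc h = acc ++ [h] := by
          simp [PySem.Set.add, List.contains_eq_mem, hm]
        have hstep : PySem.Set.update acc (h :: t) = PySem.Set.update (acc ++ [h]) t := by
          simp [PySem.Set.update, hadd]
        have hf : t.filter (fun x => decide (x ∉ acc ++ [h]))
            = (t.filter (fun x => decide (x ∉ acc))).filter (fun x => decide (x ≠ h)) := by
          rw [List.filter_filter]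
          apply List.filter_congr
          intro x _
          by_cases h1 : x = h <;> by_cases h2 : x ∈ acc <;> simp [h1, h2]
        rw [hstep, pv_update_eq_dedup t (acc ++ [h]), hf, List.filter_cons]
        simp only [decide_not]
        have hh : (!decide (h ∈ acc)) = true := by simp [hm]
        simp only [hh, if_true]
        rw [pvDedup]
        simp
termination_by ts _ => ts.length
decreasing_by all_goals simp

-- ===== VERDICT =====
theorem parse_profiles_py_spec : Claim_equal_parse_profiles_py := by
  intro items _
  unfold Spec_parse_profiles_py parse_profiles_py parse_profiles_py_alt
  simp only [pv_inner_eq_update, pv_outer_eq_update, pvDedupLoop_eq, List.nil_append]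
  rw [pv_update_eq_dedup]
  simp
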